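-- pv_equiv track=rewrite | github.com/mranderson2020/Cryptography | cryptomath.py | divisionMod
-- ===== SOURCE A (Python) =====
-- def divisionMod(dividend, divisor, n):
--     """
--     Divides two numbers under mod n. Returns all results of divisor * num (mod n) == dividend
--     :param dividend: Integer dividend
--     :param divisor: Integer divisor
--     :param n: Integer mod
--     :return: Tuple containing all results
--     """
--     results = ()
--
--     for i in range(2, n):
--         if (divisor * i) % n == dividend:
--             results = results + tuple([i])
--
--     if len(results) == 0:
--         return None
--     return results
-- ===== SOURCE B (Python) =====
-- def divisionMod(dividend, divisor, n):
--     if n <= 2 or dividend < 0 or dividend >= n: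
--         return None
--     old_r, r, old_s, s = divisor, n, 1, 0
--     while r != 0:
--         q = old_r // r
--         old_r, r = r, old_r - q * r
--         old_s, s = s, old_s - q * s
--     g = old_r
--     if dividend % g != 0:
--         return None
--     m = n // g
--     i0 = ((dividend // g) * old_s) % m
--     res = tuple(i for i in range(i0, n, m) if i >= 2)
--     return res if res else None
-- ===== Notes on version B (the rewrite author's own statement) =====
-- stated objective: faster
-- what changed: Replaces the O(n) scan of all i in range(2,n) by solving the linear congruence divisor*i = dividend (mod n) with the extended Euclidean algorithm and enumerating only the arithmetic progression of solutions.
import Mathlib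
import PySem

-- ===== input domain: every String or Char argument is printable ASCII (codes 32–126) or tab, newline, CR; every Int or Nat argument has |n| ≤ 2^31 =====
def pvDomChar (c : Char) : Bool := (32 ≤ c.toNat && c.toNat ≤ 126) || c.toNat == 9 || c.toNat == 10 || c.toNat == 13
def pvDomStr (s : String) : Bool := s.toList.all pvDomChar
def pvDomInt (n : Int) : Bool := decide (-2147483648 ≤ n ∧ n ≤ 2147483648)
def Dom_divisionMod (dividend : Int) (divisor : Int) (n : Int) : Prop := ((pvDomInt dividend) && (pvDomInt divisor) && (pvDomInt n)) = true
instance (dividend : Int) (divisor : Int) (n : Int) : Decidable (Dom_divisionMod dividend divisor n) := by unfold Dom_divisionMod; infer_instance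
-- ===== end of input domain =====

-- B replaces A's O(n) scan by solving the linear congruence with the extended Euclidean
-- algorithm and enumerating only the arithmetic progression of solutions (objective: faster).

-- ===== PORT A =====
def divisionMod (dividend : Int) (divisor : Int) (n : Int) : Option (List Int) :=
  let results := (PySem.List.pyRange 2 n 1).foldl
    (fun acc i => if PySem.Int.mod (divisor * i) n == dividend then acc ++ [i] else acc) []
  if results.length = 0 then none else some results

-- ===== PORT B =====
-- termination measure for the Euclid loop (the new remainder old_r - q*r is Python's old_r % r)
theorem pvModAbsLt (a r : Int) (hr : r ≠ 0) :
    (a - PySem.Int.floordiv a r * r).natAbs < r.natAbs := by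
  have hm : a - PySem.Int.floordiv a r * r = PySem.Int.mod a r := by
    have := PySem.Int.floordiv_mul_add_mod a r; omega
  rw [hm]
  rcases lt_or_gt_of_ne hr with h | h
  · have := PySem.Int.mod_neg_bounds a h; omega
  · have h1 := PySem.Int.mod_nonneg a h
    have h2 := PySem.Int.mod_lt a h
    omega

-- the 'while r != 0' extended-Euclid loop of Source B, state (old_r, r, old_s, s)
def pvEgcd (old_r r old_s s : Int) : Int × Int :=
  if h : r = 0 then (old_r, old_s)
  else
    let q := PySem.Int.floordiv old_r r
    pvEgcd r (old_r - q * r) s (old_s - q * s)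
termination_by r.natAbs
decreasing_by exact pvModAbsLt old_r r h

def divisionMod_alt (dividend : Int) (divisor : Int) (n : Int) : Option (List Int) :=
  if n ≤ 2 ∨ dividend < 0 ∨ n ≤ dividend then none
  else
    let gs := pvEgcd divisor n 1 0
    if PySem.Int.mod dividend gs.1 ≠ 0 then none
    else
      let m := PySem.Int.floordiv n gs.1
      let i0 := PySem.Int.mod (PySem.Int.floordiv dividend gs.1 * gs.2) m
      let res := (PySem.List.pyRange i0 n m).filter (fun i => decide (2 ≤ i))
      if res = [] then none else some res

-- ===== PRECONDITION & SPEC =====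
def Spec_divisionMod (dividend : Int) (divisor : Int) (n : Int) (out : Option (List Int)) : Prop := out = divisionMod_alt dividend divisor n
instance (dividend : Int) (divisor : Int) (n : Int) (out : Option (List Int)) : Decidable (Spec_divisionMod dividend divisor n out) := by unfold Spec_divisionMod; infer_instance

-- ===== CLAIM (what is proved, stated in full; the proofs are below) =====
def Claim_equal_divisionMod : Prop := ∀ (dividend : Int) (divisor : Int) (n : Int), Dom_divisionMod dividend divisor n → Spec_divisionMod dividend divisor n (divisionMod dividend divisor n)

-- ===== LEMMAS AND PROOFS =====

theorem pvGcdStep (a b : Int) : Int.gcd b (a % b) = Int.gcd a b := by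
  apply Nat.dvd_antisymm
  · have h1 : (Int.gcd b (a % b) : Int) ∣ b := Int.gcd_dvd_left _ _
    have h2 : (Int.gcd b (a % b) : Int) ∣ a % b := Int.gcd_dvd_right _ _
    have h3 : (Int.gcd b (a % b) : Int) ∣ a := by
      have h := dvd_add (h1.mul_right (a / b)) h2
      rwa [Int.mul_ediv_add_emod] at h
    exact Int.dvd_gcd h3 h1
  · have h1 : (Int.gcd a b : Int) ∣ a := Int.gcd_dvd_left _ _
    have h2 : (Int.gcd a b : Int) ∣ b := Int.gcd_dvd_right _ _
    have h3 : (Int.gcd a b : Int) ∣ a % b := by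
      have h := dvd_sub h1 (h2.mul_right (a / b))
      have he : a - b * (a / b) = a % b := by have := Int.mul_ediv_add_emod a b; omega
      rwa [he] at h
    exact Int.dvd_gcd h2 h3

-- invariant of the Euclid loop: first component is the gcd, second a Bezout coefficient
theorem pvEgcd_step (old_r r old_s s : Int) (hr : r ≠ 0) :
    pvEgcd old_r r old_s s = pvEgcd r (old_r - PySem.Int.floordiv old_r r * r) s
      (old_s - PySem.Int.floordiv old_r r * s) := by
  rw [pvEgcd]; simp [hr]

theorem pvEgcd_spec (a b : Int) (k : Nat) : ∀ old_r r old_s s t1 t2 : Int,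
    r.natAbs = k → 0 < r →
    a * old_s + b * t1 = old_r → a * s + b * t2 = r →
    ((pvEgcd old_r r old_s s).1 = (Int.gcd old_r r : Int) ∧
      ∃ t, a * (pvEgcd old_r r old_s s).2 + b * t = (pvEgcd old_r r old_s s).1) := by
  induction k using Nat.strong_induction_on with
  | _ k ih =>
    intro old_r r old_s s t1 t2 hk hr h1 h2
    have hrne : r ≠ 0 := ne_of_gt hr
    have habs := pvModAbsLt old_r r hrne
    have key := PySem.Int.floordiv_mul_add_mod old_r r
    rw [pvEgcd_step old_r r old_s s hrne]
    generalize hG : PySem.Int.floordiv old_r r = q at key habs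
    have hmod : old_r - q * r = PySem.Int.mod old_r r := by omega
    have hemod : old_r - q * r = old_r % r := by
      rw [hmod, PySem.Int.mod_eq_emod_of_pos hr]
    have hgr : Int.gcd r (old_r - q * r) = Int.gcd old_r r := by
      rw [hemod]; exact pvGcdStep old_r r
    have hnonneg : 0 ≤ old_r - q * r := by rw [hmod]; exact PySem.Int.mod_nonneg _ hr
    have hb2 : a * (old_s - q * s) + b * (t1 - q * t2) = old_r - q * r := by
      linear_combination h1 - q * h2
    by_cases hz : old_r - q * r = 0
    · rw [hz] at hb2 ⊢
      rw [pvEgcd, dif_pos rfl]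
      constructor
      · show r = (Int.gcd old_r r : Int)
        rw [← hgr, hz, Int.gcd_zero_right]
        omega
      · exact ⟨t2, h2⟩
    · have hpos : 0 < old_r - q * r := lt_of_le_of_ne hnonneg (Ne.symm hz)
      have hlt : (old_r - q * r).natAbs < k := by omega
      have := ih _ hlt r (old_r - q * r) s (old_s - q * s) t2 (t1 - q * t2) rfl hpos h2 hb2
      rw [hgr] at this
      exact this

-- solutions of divisor*i ≡ dividend (mod n) are exactly the class i0 (mod m)
theorem pvCore (v n g m x d i0 : Int) (hn : 0 < n) (hg : 0 < g)
    (hgv : g ∣ v) (hnm : n = g * m) (hbez : ∃ t, v * x + n * t = g)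
    (hd : 0 ≤ d) (hdn : d < n) (hgd : g ∣ d)
    (hi0 : i0 = PySem.Int.mod (PySem.Int.floordiv d g * x) m) :
    ∀ i : Int, PySem.Int.mod (v * i) n = d ↔ m ∣ i - i0 := by
  obtain ⟨t, hbz⟩ := hbez
  obtain ⟨dlt, hdlt⟩ := hgv
  obtain ⟨d', hd'⟩ := hgd
  have hm : 0 < m := by nlinarith
  have hfd : PySem.Int.floordiv d g = d' := by
    rw [PySem.Int.floordiv_eq_ediv_of_pos hg, hd', Int.mul_ediv_cancel_left _ (ne_of_gt hg)]
  have hi0' : i0 = (d' * x) % m := by rw [hi0, hfd, PySem.Int.mod_eq_emod_of_pos hm]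
  have hdvd0 : m ∣ d' * x - i0 := by
    refine ⟨(d' * x) / m, ?_⟩
    have := Int.mul_ediv_add_emod (d' * x) m
    omega
  intro i
  constructor
  · intro h
    have hmodeq : (v * i) % n = d := by rw [← PySem.Int.mod_eq_emod_of_pos hn]; exact h
    have hdvdn : n ∣ v * i - d := by
      have hz : (v * i - d) % n = 0 := by
        have hdnn : d % n = d := Int.emod_eq_of_lt hd hdn
        rw [Int.sub_emod, hmodeq, hdnn]; simp
      exact Int.dvd_of_emod_eq_zero hz
    obtain ⟨c, hc⟩ := hdvdn
    have h1 : g * (i - d' * x) = n * (x * c + t * i) := by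
      linear_combination (-i) * hbz + x * hd' + x * hc
    have h2 : m ∣ i - d' * x := by
      have hh : g * m ∣ g * (i - d' * x) := by rw [← hnm, h1]; exact Dvd.intro _ rfl
      exact (mul_dvd_mul_iff_left (ne_of_gt hg)).mp hh
    have h3 : i - i0 = (i - d' * x) + (d' * x - i0) := by ring
    rw [h3]; exact dvd_add h2 hdvd0
  · intro h
    have h2 : m ∣ i - d' * x := by
      have h3 : i - d' * x = (i - i0) - (d' * x - i0) := by ring
      rw [h3]; exact dvd_sub h hdvd0
    obtain ⟨c, hc⟩ := h2
    have hdvdn : v * i - d = n * (dlt * c - d' * t) := by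
      linear_combination d' * hbz + (m * c) * hdlt + v * hc + (-1) * hd' + (-(dlt * c)) * hnm
    rw [PySem.Int.mod_eq_emod_of_pos hn]
    have hvi : v * i = d + n * (dlt * c - d' * t) := by omega
    rw [hvi, Int.add_mul_emod_self_left]
    exact Int.emod_eq_of_lt hd hdn

theorem pvA_eq (dividend divisor n : Int) :
    divisionMod dividend divisor n =
      (if ((PySem.List.pyRange 2 n 1).filter (fun i => PySem.Int.mod (divisor * i) n == dividend)) = [] then none
       else some ((PySem.List.pyRange 2 n 1).filter (fun i => PySem.Int.mod (divisor * i) n == dividend))) := by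
  unfold divisionMod
  rw [PySem.List.foldl_append_if_eq_filter]
  simp [List.length_eq_zero_iff]

theorem pvMain (dividend divisor n : Int) :
    divisionMod dividend divisor n = divisionMod_alt dividend divisor n := by
  rw [pvA_eq]
  by_cases hn2 : n ≤ 2
  · rw [PySem.List.pyRange_one_eq_nil hn2]
    simp [divisionMod_alt, hn2]
  · have hn2' : 2 < n := by omega
    have hn : 0 < n := by omega
    clear hn2
    have hnn : n ≠ 0 := by omega
    obtain ⟨hg1, t, hbzt⟩ := pvEgcd_spec divisor n n.natAbs divisor n 1 0 0 1 rfl hn (by ring) (by ring)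
    have hGne : Int.gcd divisor n ≠ 0 := by
      simp [Int.gcd_eq_zero_iff]
      intro _; exact hnn
    have hg : (0:Int) < (pvEgcd divisor n 1 0).1 := by
      rw [hg1]; exact_mod_cast Nat.pos_of_ne_zero hGne
    have hgv : (pvEgcd divisor n 1 0).1 ∣ divisor := by rw [hg1]; exact Int.gcd_dvd_left _ _
    have hgn : (pvEgcd divisor n 1 0).1 ∣ n := by rw [hg1]; exact Int.gcd_dvd_right _ _
    set g := (pvEgcd divisor n 1 0).1 with hgdef
    set x := (pvEgcd divisor n 1 0).2 with hxdef
    by_cases hrange : dividend < 0 ∨ n ≤ dividend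
    · -- dividend outside [0, n): no i satisfies the test, both sides none
      have hfil : ((PySem.List.pyRange 2 n 1).filter
          (fun i => PySem.Int.mod (divisor * i) n == dividend)) = [] := by
        rw [List.filter_eq_nil_iff]
        intro i _
        simp only [beq_iff_eq]
        intro hmod
        have h1 := PySem.Int.mod_nonneg (divisor * i) hn
        have h2 := PySem.Int.mod_lt (divisor * i) hn
        omega
      rw [hfil]
      simp [divisionMod_alt]
      omega
    · have hd0 : 0 ≤ dividend := by omega
      have hdn : dividend < n := by omega
      by_cases hgd : g ∣ dividend
      · have hmz : PySem.Int.mod dividend g = 0 := (PySem.Int.mod_eq_zero_iff_dvd _ _).mpr hgd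
        have hfde : PySem.Int.floordiv n g = n / g := PySem.Int.floordiv_eq_ediv_of_pos hg
        have hnm : n = g * (PySem.Int.floordiv n g) := by rw [hfde, Int.mul_ediv_cancel' hgn]
        set m := PySem.Int.floordiv n g with hmdef
        have hm : 0 < m := by nlinarith
        set i0 := PySem.Int.mod (PySem.Int.floordiv dividend g * x) m with hi0def
        have hcore := pvCore divisor n g m x dividend i0 hn hg hgv hnm ⟨t, hbzt⟩ hd0 hdn hgd hi0def
        have halt : divisionMod_alt dividend divisor n =
            (if ((PySem.List.pyRange i0 n m).filter (fun i => decide (2 ≤ i))) = [] then none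
             else some ((PySem.List.pyRange i0 n m).filter (fun i => decide (2 ≤ i)))) := by
          simp only [divisionMod_alt]
          rw [if_neg (by omega : ¬(n ≤ 2 ∨ dividend < 0 ∨ n ≤ dividend))]
          rw [← hgdef, ← hxdef, ← hmdef, ← hi0def]
          rw [if_neg (by simpa using hmz)]
        rw [halt]
        have hmemL : ∀ y : Int, y ∈ ((PySem.List.pyRange 2 n 1).filter
            (fun i => PySem.Int.mod (divisor * i) n == dividend)) ↔
            (2 ≤ y ∧ y < n ∧ m ∣ y - i0) := by
          intro y
          rw [List.mem_filter, PySem.List.mem_pyRange_one, beq_iff_eq, hcore y]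
          tauto
        have hi0nn : 0 ≤ i0 := PySem.Int.mod_nonneg _ hm
        have hi0lt : i0 < m := PySem.Int.mod_lt _ hm
        have hmemR : ∀ y : Int, y ∈ ((PySem.List.pyRange i0 n m).filter (fun i => decide (2 ≤ i))) ↔
            (2 ≤ y ∧ y < n ∧ m ∣ y - i0) := by
          intro y
          rw [List.mem_filter, PySem.List.mem_pyRange_iff_of_pos hm, decide_eq_true_iff]
          constructor
          · rintro ⟨⟨h1, h2, h3⟩, h4⟩; exact ⟨h4, h2, h3⟩
          · rintro ⟨h1, h2, h3⟩
            refine ⟨⟨?_, h2, h3⟩, h1⟩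
            obtain ⟨c, hc⟩ := h3
            rcases le_or_gt 0 c with hcnn | hcneg
            · have : 0 ≤ m * c := mul_nonneg (le_of_lt hm) hcnn
              omega
            · have hcle : c ≤ -1 := by omega
              have : m * c ≤ m * (-1) := mul_le_mul_of_nonneg_left hcle (le_of_lt hm)
              omega
        have hpL : ((PySem.List.pyRange 2 n 1).filter
            (fun i => PySem.Int.mod (divisor * i) n == dividend)).Pairwise (· < ·) :=
          (PySem.List.pairwise_lt_pyRange_one 2 n).filter _
        have hpR : ((PySem.List.pyRange i0 n m).filter (fun i => decide (2 ≤ i))).Pairwise (· < ·) := by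
          refine List.Pairwise.filter _ ?_
          rw [PySem.List.pyRange_of_pos i0 n hm]
          refine List.Pairwise.map _ ?_ (List.pairwise_lt_range)
          intro a b hab
          have hab' : (a : Int) < (b : Int) := by exact_mod_cast hab
          nlinarith
        have hperm := (List.perm_ext_iff_of_nodup
            (hpL.imp (fun h => ne_of_lt h)) (hpR.imp (fun h => ne_of_lt h))).mpr
            (fun y => (hmemL y).trans (hmemR y).symm)
        have hLR := List.Perm.eq_of_pairwise (le := (· ≤ · : Int → Int → Prop))
          (fun a b _ _ h1 h2 => le_antisymm h1 h2)
          (hpL.imp le_of_lt) (hpR.imp le_of_lt) hperm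
        rw [hLR]
      · -- g does not divide dividend: no solution; both none
        have hfil : ((PySem.List.pyRange 2 n 1).filter
            (fun i => PySem.Int.mod (divisor * i) n == dividend)) = [] := by
          rw [List.filter_eq_nil_iff]
          intro i _
          simp only [beq_iff_eq]
          intro hmod
          apply hgd
          have hq := PySem.Int.floordiv_mul_add_mod (divisor * i) n
          have : PySem.Int.mod (divisor * i) n = divisor * i - PySem.Int.floordiv (divisor * i) n * n := by omega
          rw [← hmod, this]
          exact dvd_sub (hgv.mul_right i) ((hgn.mul_left _))
        rw [hfil]
        have hmne : PySem.Int.mod dividend g ≠ 0 := by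
          rw [Ne, PySem.Int.mod_eq_zero_iff_dvd]
          exact hgd
        rw [PySem.Int.mod_eq_emod_of_pos hg] at hmne
        simp [divisionMod_alt]
        intro _ _ _ hzero
        rw [← hgdef, PySem.Int.mod_eq_emod_of_pos hg] at hzero
        exact absurd hzero hmne

-- ===== VERDICT (by name: the statement is the Claim_ definition above) =====
theorem divisionMod_spec : Claim_equal_divisionMod := by
  intro dividend divisor n _
  unfold Spec_divisionMod
  exact pvMain dividend divisor n
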